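-- pv_equiv track=rewrite | github.com/invenia/shepherd | shepherd/common/utils.py | get
-- ===== SOURCE A (Python) =====
-- def get(dictionary, keys, mutually_exclusive=True):
--     """
--     Allows getting a value from a dict using multiple possible keys.
--
--     Args:
--         dict (dict): the dict to get the return value from.
--         keys (list): a list of keys to search for.
--         mutually_exclusive (bool): whether or not to assert that the keys are mutually exclusive.
--     """
--     result = None
--     for key in keys:
--         if not result and key in dictionary:
--             result = dictionary[key]
--         elif result and key in dictionary and mutually_exclusive:
--             raise KeyError(
--                 "Key {} and {} are not mutually exclusive \
--                 in the provided dict.".format(result, key)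
--             )
--
--     if not result:
--         raise KeyError('None of the keys {} matched'.format(keys))
--
--     return result
-- ===== SOURCE B (Python) =====
-- def get(dictionary, keys, mutually_exclusive=True):
--     present = [k for k in keys if k in dictionary]
--     for i, key in enumerate(present):
--         value = dictionary[key]
--         if not value:
--             continue
--         if mutually_exclusive and i + 1 < len(present):
--             raise KeyError(
--                 "Key {} and {} are not mutually exclusive \
--                 in the provided dict.".format(value, present[i + 1])
--             )
--         return value
--     raise KeyError('None of the keys {} matched'.format(keys))
-- ===== Notes on version B (the rewrite author's own statement) =====
-- stated objective: alternative
-- what changed: B first filters keys to those present in the dict, then scans that list once for the first truthy value and returns it early (raising the mutual-exclusion error iff a later present key exists), replacing A's full stateful pass that tracks truthiness in a mutable result.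
import Mathlib
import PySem

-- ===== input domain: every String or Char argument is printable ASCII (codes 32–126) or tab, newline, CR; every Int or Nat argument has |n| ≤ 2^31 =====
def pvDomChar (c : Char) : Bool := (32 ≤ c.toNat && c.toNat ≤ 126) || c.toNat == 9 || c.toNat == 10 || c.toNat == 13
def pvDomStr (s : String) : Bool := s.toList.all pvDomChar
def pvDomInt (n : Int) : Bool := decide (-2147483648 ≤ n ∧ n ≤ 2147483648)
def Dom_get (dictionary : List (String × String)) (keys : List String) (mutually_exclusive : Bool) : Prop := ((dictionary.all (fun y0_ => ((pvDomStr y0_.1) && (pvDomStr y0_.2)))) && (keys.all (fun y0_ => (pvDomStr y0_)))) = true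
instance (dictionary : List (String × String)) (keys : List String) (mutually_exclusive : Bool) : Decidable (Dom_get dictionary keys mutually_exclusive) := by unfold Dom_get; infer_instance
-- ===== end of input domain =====

-- B replaces A's single stateful truthiness-tracking pass by filter-present-keys
-- then return the first truthy value (alternative decomposition, same cost).
-- On inputs where Python raises KeyError (excluded by Pre_get) both ports return "".

-- shared primitive: first-match association-list lookup (Python's 'key in dict' / 'dict[key]')
def lookup? (dictionary : List (String × String)) (key : String) : Option String :=
  (dictionary.find? (fun p => p.1 == key)).map (·.2)

-- ===== PORT A =====
-- result = None is modelled as "": Python's truthiness test 'not result' is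
-- identical for None and "" and a falsy result is never returned (A raises then).
-- Both raise statements are modelled by returning "" (those inputs are outside Pre_get).
def getLoopA (dictionary : List (String × String)) (mutually_exclusive : Bool) :
    List String → String → String
  | [], result => result            -- after the loop: 'if not result: raise' → "" stays ""
  | key :: ks, result =>
    if result.isEmpty && (lookup? dictionary key).isSome then
      getLoopA dictionary mutually_exclusive ks ((lookup? dictionary key).getD "")
    else if !result.isEmpty && (lookup? dictionary key).isSome && mutually_exclusive then
      ""                            -- raise KeyError (mutual exclusion)
    else
      getLoopA dictionary mutually_exclusive ks result

def get (dictionary : List (String × String)) (keys : List String) (mutually_exclusive : Bool) : String :=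
  getLoopA dictionary mutually_exclusive keys ""

-- ===== PORT B =====
-- scan the present keys for the first truthy value; 'rest ≠ []' is Source B's 'i + 1 < len(present)';
-- both raise statements are modelled by returning "".
def findTruthyB (dictionary : List (String × String)) (mutually_exclusive : Bool) :
    List String → String
  | [] => ""                        -- raise KeyError('None of the keys … matched')
  | key :: rest =>
    let value := (lookup? dictionary key).getD ""
    if value.isEmpty then findTruthyB dictionary mutually_exclusive rest
    else if mutually_exclusive && !rest.isEmpty then ""   -- raise KeyError (mutual exclusion)
    else value

def get_alt (dictionary : List (String × String)) (keys : List String) (mutually_exclusive : Bool) : String :=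
  let present := keys.filter (fun k => (lookup? dictionary k).isSome)
  findTruthyB dictionary mutually_exclusive present

-- ===== PRECONDITION & SPEC =====
-- Pre_get = exactly the inputs where Python A returns (raises no KeyError): among the
-- values of the keys present in the dict, some value is truthy (non-empty), and with
-- mutually_exclusive no present key follows the first truthy one.
def Pre_get (dictionary : List (String × String)) (keys : List String) (mutually_exclusive : Bool) : Prop :=
  let tail := ((keys.filter (fun k => (lookup? dictionary k).isSome)).map
      (fun k => (lookup? dictionary k).getD "")).dropWhile (·.isEmpty)
  tail ≠ [] ∧ (mutually_exclusive = true → tail.length = 1)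
instance (dictionary : List (String × String)) (keys : List String) (mutually_exclusive : Bool) : Decidable (Pre_get dictionary keys mutually_exclusive) := by unfold Pre_get; infer_instance

def pvWitness_get : (List (String × String)) × List String × Bool := ([("a", "1")], ["a", "b"], true)

def Spec_get (dictionary : List (String × String)) (keys : List String) (mutually_exclusive : Bool) (out : String) : Prop := out = get_alt dictionary keys mutually_exclusive
instance (dictionary : List (String × String)) (keys : List String) (mutually_exclusive : Bool) (out : String) : Decidable (Spec_get dictionary keys mutually_exclusive out) := by unfold Spec_get; infer_instance

-- ===== CLAIM (what is proved, stated in full; the proofs are below) =====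
def Claim_equal_get : Prop := ∀ (dictionary : List (String × String)) (keys : List String) (mutually_exclusive : Bool), Dom_get dictionary keys mutually_exclusive → Pre_get dictionary keys mutually_exclusive → Spec_get dictionary keys mutually_exclusive (get dictionary keys mutually_exclusive)

-- ===== LEMMAS AND PROOFS =====

-- A's loop restricted to the present keys (non-present keys leave the state unchanged).
def goPresent (dictionary : List (String × String)) (mutually_exclusive : Bool) :
    List String → String → String
  | [], result => result
  | key :: ks, result =>
    if result.isEmpty then
      goPresent dictionary mutually_exclusive ks ((lookup? dictionary key).getD "")
    else if mutually_exclusive then ""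
    else goPresent dictionary mutually_exclusive ks result

lemma getLoopA_eq_goPresent (d : List (String × String)) (me : Bool) (ks : List String) (r : String) :
    getLoopA d me ks r = goPresent d me (ks.filter (fun k => (lookup? d k).isSome)) r := by
  induction ks generalizing r with
  | nil => rfl
  | cons k ks ih =>
    simp only [getLoopA, List.filter_cons]
    by_cases hp : (lookup? d k).isSome = true <;> by_cases hr : r.isEmpty = true <;>
        cases me <;> simp [hp, hr, goPresent, ih]

lemma goPresent_stuck (d : List (String × String)) (ks : List String) (r : String)
    (hr : r.isEmpty = false) : goPresent d false ks r = r := by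
  induction ks with
  | nil => rfl
  | cons k ks ih => simp [goPresent, hr, ih]

lemma goPresent_eq_findTruthyB (d : List (String × String)) (me : Bool) (P : List String) :
    goPresent d me P "" = findTruthyB d me P := by
  induction P with
  | nil => rfl
  | cons k P ih =>
    simp only [goPresent, show ("" : String).isEmpty = true from rfl, if_pos, findTruthyB]
    by_cases hv : ((lookup? d k).getD "").isEmpty = true
    · have hv' : (lookup? d k).getD "" = "" := String.isEmpty_iff.mp hv
      rw [hv', ih]; simp [hv]
    · simp only [Bool.not_eq_true] at hv
      simp only [hv, Bool.false_eq_true, if_false]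
      cases me with
      | false => simp [goPresent_stuck d P _ hv]
      | true =>
        cases P with
        | nil => rfl
        | cons k' P' => simp [goPresent, hv]

-- ===== VERDICT (by name: the statement is the Claim_ definition above) =====
theorem get_spec : Claim_equal_get := by
  intro d keys me _ _
  unfold Spec_get _root_.get get_alt
  rw [getLoopA_eq_goPresent, goPresent_eq_findTruthyB]
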